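-- pv_equiv track=rewrite | github.com/DoctorDalek1963/WhatsApp-HTML-Formatter | new_functions.py | format_to_html
-- ===== SOURCE A (Python) =====
-- formatDict = {"_": "em", "*": "strong", "~": "del"}  # Dict of format chars with their html tags
--
-- def format_to_html(string: str):
--     """Replace format characters with their html tags."""
--     first_tag = True
--     list_string = list(string)
--
--     for char, tag in formatDict.items():
--         for x, letter in enumerate(list_string):
--             if letter == char:
--                 if first_tag:
--                     list_string[x] = f"<{tag}>"
--                     first_tag = False
--                 else:
--                     list_string[x] = f"</{tag}>"
--                     first_tag = True
--
--     return "".join(list_string)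
-- ===== SOURCE B (Python) =====
-- formatDict = {"_": "em", "*": "strong", "~": "del"}  # Dict of format chars with their html tags
--
--
-- def format_to_html(string: str):
--     """Replace format characters with their html tags."""
--     # First pass: collect (position, tag) pairs in char-major / string order.
--     positions = []
--     for char, tag in formatDict.items():
--         for x, letter in enumerate(string):
--             if letter == char:
--                 positions.append((x, tag))
--     # Second pass: write opening tags at even ranks, closing tags at odd ranks.
--     chars = list(string)
--     for n, (x, tag) in enumerate(positions):
--         chars[x] = f"<{tag}>" if n % 2 == 0 else f"</{tag}>"
--     return "".join(chars)
-- ===== Notes on version B (the rewrite author's own statement) =====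
-- stated objective: alternative
-- what changed: B splits A's single stateful sweep into two passes: it first collects a (position, tag) table by scanning the string per format char in dict order, then writes opening/closing tags into a list copy by the parity of each entry's rank, replacing A's cross-pass boolean toggle and in-place rescanning of the mutated list.
import Mathlib
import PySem

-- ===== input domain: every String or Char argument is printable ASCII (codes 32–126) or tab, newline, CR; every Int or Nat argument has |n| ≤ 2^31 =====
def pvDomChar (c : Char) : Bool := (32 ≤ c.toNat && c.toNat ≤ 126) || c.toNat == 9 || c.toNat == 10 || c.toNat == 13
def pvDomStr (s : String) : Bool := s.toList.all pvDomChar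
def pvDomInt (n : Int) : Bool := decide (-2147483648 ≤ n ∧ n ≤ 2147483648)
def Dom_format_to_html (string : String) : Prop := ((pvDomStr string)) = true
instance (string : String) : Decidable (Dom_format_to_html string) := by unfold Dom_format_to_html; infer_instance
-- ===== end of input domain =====

-- B replaces A's in-loop open/close boolean toggle by a two-pass decomposition: first collect a
-- (position, tag) table in char-major order, then write tags by rank parity (objective: alternative).

-- ===== PORT A =====
def fmtItems : List (String × String) := [("_", "em"), ("*", "strong"), ("~", "del")]

-- the inner 'for x, letter in enumerate(list_string)' loop of A, threading first_tag
def fthInner (char tag : String) : List String → Bool → List String × Bool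
  | [], first => ([], first)
  | l :: ls, first =>
    if l = char then
      if first then
        let r := fthInner char tag ls false
        (("<" ++ tag ++ ">") :: r.1, r.2)
      else
        let r := fthInner char tag ls true
        (("</" ++ tag ++ ">") :: r.1, r.2)
    else
      let r := fthInner char tag ls first
      (l :: r.1, r.2)

def format_to_html (string : String) : String :=
  let res := fmtItems.foldl (fun st it => fthInner it.1 it.2 st.1 st.2)
      (string.toList.map (fun c => String.ofList [c]), true)
  PySem.Str.join "" res.1

-- ===== PORT B =====
-- the body of B's second 'for n, (x, tag) in enumerate(positions)' loop
def bStep : List String → Int × (Int × String) → List String :=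
  fun cs q => cs.set q.2.1.toNat (if PySem.Int.mod q.1 2 = 0 then "<" ++ q.2.2 ++ ">" else "</" ++ q.2.2 ++ ">")

def format_to_html_alt (string : String) : String :=
  let positions := fmtItems.foldl (fun ps it =>
      (PySem.List.enumerate string.toList 0).foldl (fun ps p =>
        if String.ofList [p.2] = it.1 then ps ++ [(p.1, it.2)] else ps) ps)
    ([] : List (Int × String))
  let chars := string.toList.map (fun c => String.ofList [c])
  -- chars[x] = … : x comes from enumerate(string), hence 0 ≤ x < len, so .toNat is exact
  let out := (PySem.List.enumerate positions 0).foldl bStep chars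
  PySem.Str.join "" out

-- ===== PRECONDITION & SPEC =====
def Spec_format_to_html (string : String) (out : String) : Prop := out = format_to_html_alt string
instance (string : String) (out : String) : Decidable (Spec_format_to_html string out) := by unfold Spec_format_to_html; infer_instance

-- ===== CLAIM (what is proved, stated in full; the proofs are below) =====
def Claim_equal_format_to_html : Prop := ∀ (string : String), Dom_format_to_html string → Spec_format_to_html string (format_to_html string)

-- ===== LEMMAS AND PROOFS =====

-- rank-counting reformulation of A's inner pass: element n of the global open/close alternation
def innerC (char tag : String) : Int → List String → List String
  | _, [] => []
  | n, l :: ls =>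
    if l = char then
      (if PySem.Int.mod n 2 = 0 then "<" ++ tag ++ ">" else "</" ++ tag ++ ">") :: innerC char tag (n + 1) ls
    else l :: innerC char tag n ls

-- the (position, tag) table B collects for one char, indices starting at k
def posFrom (c tag : String) (k : Int) (s : List Char) : List (Int × String) :=
  ((PySem.List.enumerate s k).filter (fun p => String.ofList [p.2] = c)).map (fun p => (p.1, tag))

lemma mod2_succ (n : Int) : (decide (PySem.Int.mod (n + 1) 2 = 0)) = !(decide (PySem.Int.mod n 2 = 0)) := by
  simp only [PySem.Int.mod_eq_emod_of_pos (show (0:Int) < 2 by norm_num)]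
  by_cases h : n % 2 = 0
  · have h1 : ¬ ((n + 1) % 2 = 0) := by omega
    simp [h, h1]
  · have h1 : (n + 1) % 2 = 0 := by omega
    simp [h, h1]

lemma fthInner_eq (c tag : String) (ls : List String) (n : Int) :
    fthInner c tag ls (decide (PySem.Int.mod n 2 = 0)) =
      (innerC c tag n ls, decide (PySem.Int.mod (n + ls.count c) 2 = 0)) := by
  induction ls generalizing n with
  | nil => simp [fthInner, innerC]
  | cons l ls ih =>
    by_cases hl : l = c
    · subst hl
      have harg : n + ((l :: ls).count l : Int) = (n + 1) + (ls.count l : Int) := by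
        rw [List.count_cons_self]; push_cast; ring
      rw [harg]
      by_cases hn : PySem.Int.mod n 2 = 0
      · have hb : decide (PySem.Int.mod n 2 = 0) = true := decide_eq_true hn
        have hb1 : (false : Bool) = decide (PySem.Int.mod (n + 1) 2 = 0) := by
          rw [mod2_succ, hb]; rfl
        have h1 : fthInner l tag ls false =
            (innerC l tag (n + 1) ls, decide (PySem.Int.mod (n + 1 + (ls.count l : Int)) 2 = 0)) := by
          rw [hb1]; exact ih (n + 1)
        have hd : 2 ∣ n := (PySem.Int.mod_eq_zero_iff_dvd n 2).mp hn
        simp [fthInner, innerC, h1, hd]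
      · have hb : decide (PySem.Int.mod n 2 = 0) = false := decide_eq_false hn
        have hb1 : (true : Bool) = decide (PySem.Int.mod (n + 1) 2 = 0) := by
          rw [mod2_succ, hb]; rfl
        have h1 : fthInner l tag ls true =
            (innerC l tag (n + 1) ls, decide (PySem.Int.mod (n + 1 + (ls.count l : Int)) 2 = 0)) := by
          rw [hb1]; exact ih (n + 1)
        have hd : ¬ 2 ∣ n := fun h => hn ((PySem.Int.mod_eq_zero_iff_dvd n 2).mpr h)
        simp [fthInner, innerC, h1, hd]
    · have harg : ((l :: ls).count c : Int) = (ls.count c : Int) := by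
        rw [List.count_cons_of_ne hl]
      simp only [fthInner, innerC, if_neg hl, ih, harg]

lemma innerC_length (c tag : String) (n : Int) (cs : List String) :
    (innerC c tag n cs).length = cs.length := by
  induction cs generalizing n with
  | nil => rfl
  | cons l ls ih => simp only [innerC]; split_ifs <;> simp [ih]

lemma innerC_pres (c tag c' : String) (hc : c' ≠ c) (h1 : "<" ++ tag ++ ">" ≠ c')
    (h2 : "</" ++ tag ++ ">" ≠ c') (n : Int) (cs : List String) (x : Nat)
    (hx : x < cs.length) :
    (innerC c tag n cs)[x]'(by rw [innerC_length]; exact hx) = c' ↔ cs[x] = c' := by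
  induction cs generalizing n x with
  | nil => simp at hx
  | cons l ls ih =>
    simp only [innerC]
    split_ifs with hl hm
    · cases x with
      | zero => simp [hl, h1, Ne.symm hc]
      | succ x => simpa using ih (n + 1) x (by simpa using hx)
    · cases x with
      | zero => simp [hl, h2, Ne.symm hc]
      | succ x => simpa using ih (n + 1) x (by simpa using hx)
    · cases x with
      | zero => simp
      | succ x => simpa using ih n x (by simpa using hx)

lemma innerC_count (c tag c' : String) (hc : c' ≠ c) (h1 : "<" ++ tag ++ ">" ≠ c')
    (h2 : "</" ++ tag ++ ">" ≠ c') (n : Int) (cs : List String) :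
    (innerC c tag n cs).count c' = cs.count c' := by
  induction cs generalizing n with
  | nil => rfl
  | cons l ls ih =>
    simp only [innerC]
    split_ifs with hl hm <;>
      simp [List.count_cons, ih, h1, h2, hl, Ne.symm hc]

lemma enum_shift {α : Type} (s : List α) (k : Int) :
    PySem.List.enumerate s (k + 1) = (PySem.List.enumerate s k).map (fun p => (p.1 + 1, p.2)) := by
  induction s generalizing k with
  | nil => rfl
  | cons a s ih =>
    simp only [PySem.List.enumerate_cons, List.map_cons]
    rw [show k + 1 + 1 = (k + 1) + 1 by ring] at *
    rw [ih]

lemma posFrom_shift (c tag : String) (k : Int) (s : List Char) :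
    posFrom c tag (k + 1) s = (posFrom c tag k s).map (fun q => (q.1 + 1, q.2)) := by
  simp only [posFrom, enum_shift, List.filter_map, List.map_map, Function.comp_def]

lemma posFrom_nonneg (c tag : String) (k : Int) (s : List Char) :
    ∀ q ∈ posFrom c tag k s, k ≤ q.1 := by
  intro q hq
  simp only [posFrom, List.mem_map, List.mem_filter] at hq
  obtain ⟨p, ⟨hp, _⟩, rfl⟩ := hq
  rw [PySem.List.mem_enumerate_iff] at hp
  obtain ⟨i, hi, rfl⟩ := hp
  simp

lemma posFrom_length (c tag : String) (k : Int) (s : List Char) :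
    (posFrom c tag k s).length = s.countP (fun a => String.ofList [a] = c) := by
  induction s generalizing k with
  | nil => rfl
  | cons a s ih =>
    simp only [posFrom, PySem.List.enumerate_cons, List.filter_cons, List.countP_cons]
    split_ifs with h <;> simp_all [posFrom]

lemma foldl_bStep_bump (qs : List (Int × String)) (hq : ∀ q ∈ qs, 0 ≤ q.1) (n : Int)
    (l : String) (ls : List String) :
    (PySem.List.enumerate (qs.map (fun q => (q.1 + 1, q.2))) n).foldl bStep (l :: ls) =
      l :: (PySem.List.enumerate qs n).foldl bStep ls := by
  induction qs generalizing n ls with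
  | nil => rfl
  | cons q qs ih =>
    have hq0 : 0 ≤ q.1 := hq q (by simp)
    have ht : (q.1 + 1).toNat = q.1.toNat + 1 := by omega
    simp only [List.map_cons, PySem.List.enumerate_cons, List.foldl_cons]
    have hstep : bStep (l :: ls) (n, (q.1 + 1, q.2)) = l :: bStep ls (n, (q.1, q.2)) := by
      simp [bStep, ht]
    rw [hstep]
    exact ih (fun p hp => hq p (by simp [hp])) (n + 1) (bStep ls (n, (q.1, q.2)))

lemma pass_eq (c tag : String) :
    ∀ (s : List Char) (cs : List String) (n : Int),
      ∀ (hlen : cs.length = s.length),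
      (∀ (x : Nat) (h : x < s.length), cs[x]'(by omega) = c ↔ String.ofList [s[x]] = c) →
      (PySem.List.enumerate (posFrom c tag 0 s) n).foldl bStep cs = innerC c tag n cs := by
  intro s
  induction s with
  | nil =>
    intro cs n hlen _
    have hcs : cs = [] := List.eq_nil_of_length_eq_zero (by simpa using hlen)
    subst hcs
    rfl
  | cons a s ih =>
    intro cs n hlen hiff
    obtain ⟨l, ls, rfl⟩ : ∃ l ls, cs = l :: ls := by
      cases cs with
      | nil => simp at hlen
      | cons l ls => exact ⟨l, ls, rfl⟩
    have hlen' : ls.length = s.length := by simpa using hlen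
    have hiff' : ∀ (x : Nat) (h : x < s.length), ls[x]'(by omega) = c ↔ String.ofList [s[x]] = c := by
      intro x h
      have := hiff (x + 1) (by simpa using Nat.succ_lt_succ h)
      simpa using this
    have hl0 := hiff 0 (by simp)
    simp only [List.getElem_cons_zero] at hl0
    have hpos : posFrom c tag 0 (a :: s) =
        (if String.ofList [a] = c then [((0 : Int), tag)] else []) ++
          (posFrom c tag 0 s).map (fun q => (q.1 + 1, q.2)) := by
      rw [← posFrom_shift]
      by_cases h : String.ofList [a] = c <;>
        simp [posFrom, PySem.List.enumerate_cons, h]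
    by_cases h : String.ofList [a] = c
    · have hl : l = c := hl0.mpr h
      rw [hpos, if_pos h, List.singleton_append, PySem.List.enumerate_cons, List.foldl_cons]
      have hstep : bStep (l :: ls) (n, ((0 : Int), tag)) =
          (if PySem.Int.mod n 2 = 0 then "<" ++ tag ++ ">" else "</" ++ tag ++ ">") :: ls := by
        simp [bStep]
      rw [hstep, foldl_bStep_bump _ (posFrom_nonneg c tag 0 s) (n + 1) _ ls,
        ih ls (n + 1) hlen' hiff']
      simp [innerC, hl]
    · have hl : ¬ l = c := fun he => h (hl0.mp he)
      rw [hpos, if_neg h, List.nil_append,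
        foldl_bStep_bump _ (posFrom_nonneg c tag 0 s) n l ls, ih ls n hlen' hiff']
      simp [innerC, hl]

-- ===== VERDICT (by name: the statement is the Claim_ definition above) =====
theorem format_to_html_spec : Claim_equal_format_to_html := by
  intro string _
  unfold Spec_format_to_html
  unfold format_to_html format_to_html_alt
  simp only [fmtItems, List.foldl]
  have hcol : ∀ (ps : List (Int × String)) (ch tg : String),
      List.foldl (fun ps p => if String.ofList [p.2] = ch then ps ++ [(p.1, tg)] else ps) ps
        (PySem.List.enumerate string.toList 0) = ps ++ posFrom ch tg 0 string.toList := by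
    intro ps ch tg
    simpa [posFrom] using PySem.List.foldl_append_if
      (fun (p : Int × Char) => decide (String.ofList [p.2] = ch)) (fun p => (p.1, tg))
      (PySem.List.enumerate string.toList 0) ps
  rw [hcol, hcol, hcol]
  simp only [List.nil_append]
  rw [PySem.List.enumerate_append, PySem.List.enumerate_append, List.foldl_append,
    List.foldl_append]
  have hlen0 : (string.toList.map (fun c => String.ofList [c])).length = string.toList.length := by
    simp
  have hiff0 : ∀ (c0 : String) (x : Nat) (h : x < string.toList.length),
      ((string.toList.map (fun c => String.ofList [c]))[x]'(by simpa using h)) = c0 ↔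
        String.ofList [string.toList[x]] = c0 := by
    intro c0 x h; simp
  have hiff1 : ∀ (x : Nat) (h : x < string.toList.length),
      ((innerC "_" "em" 0 (string.toList.map (fun c => String.ofList [c])))[x]'(by
          rw [innerC_length]; omega)) = "*" ↔
        String.ofList [string.toList[x]] = "*" := by
    intro x h
    rw [innerC_pres "_" "em" "*" (by decide) (by decide) (by decide) 0 _ x (by omega)]
    exact hiff0 "*" x h
  have hiff2 : ∀ (x : Nat) (h : x < string.toList.length),
      ((innerC "*" "strong" (0 + ((posFrom "_" "em" 0 string.toList).length : Int))
          (innerC "_" "em" 0 (string.toList.map (fun c => String.ofList [c]))))[x]'(by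
          rw [innerC_length, innerC_length]; omega)) = "~" ↔
        String.ofList [string.toList[x]] = "~" := by
    intro x h
    rw [innerC_pres "*" "strong" "~" (by decide) (by decide) (by decide) _ _ x (by
        rw [innerC_length]; omega)]
    rw [innerC_pres "_" "em" "~" (by decide) (by decide) (by decide) 0 _ x (by omega)]
    exact hiff0 "~" x h
  rw [pass_eq "_" "em" string.toList _ 0 hlen0 (hiff0 "_")]
  rw [pass_eq "*" "strong" string.toList _ _ (by rw [innerC_length]; exact hlen0) hiff1]
  rw [pass_eq "~" "del" string.toList _ _ (by rw [innerC_length, innerC_length]; exact hlen0)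
    hiff2]
  -- A side: replace each pass and its toggled flag by the rank-counting form
  have hA1 := fthInner_eq "_" "em" (string.toList.map (fun c => String.ofList [c])) 0
  rw [show (decide (PySem.Int.mod (0 : Int) 2 = 0)) = true from rfl] at hA1
  rw [hA1]
  dsimp only
  rw [fthInner_eq "*" "strong" _ (0 + (((string.toList.map (fun c => String.ofList [c])).count "_" : Int)))]
  dsimp only
  rw [fthInner_eq "~" "del" _ ((0 + (((string.toList.map (fun c => String.ofList [c])).count "_" : Int))) +
    (((innerC "_" "em" 0 (string.toList.map (fun c => String.ofList [c]))).count "*" : Int)))]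
  dsimp only
  -- match the rank offsets: table-chunk lengths are the char counts
  have hpl : ∀ ch tg : String, ((posFrom ch tg 0 string.toList).length : Int) =
      (((string.toList.map (fun c => String.ofList [c])).count ch : Int)) := by
    intro ch tg
    have hcnt : ∀ (s : List Char), s.countP (fun a => String.ofList [a] = ch) =
        (s.map (fun c => String.ofList [c])).count ch := by
      intro s
      induction s with
      | nil => rfl
      | cons a s ih =>
        by_cases h : String.ofList [a] = ch <;>
          simp [ih, h]
    rw [posFrom_length, hcnt]
  have hc2 : (innerC "_" "em" 0 (string.toList.map (fun c => String.ofList [c]))).count "*" =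
      (string.toList.map (fun c => String.ofList [c])).count "*" :=
    innerC_count "_" "em" "*" (by decide) (by decide) (by decide) 0 _
  congr 1
  rw [List.length_append]
  congr 1
  · push_cast [hpl "_" "em", hpl "*" "strong", hc2]
    ring
  · congr 1
    rw [hpl "_" "em"]
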